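-- pv_equiv track=rewrite | github.com/MMMMMMaXX/langgraph-agent | app/chunking/chunker.py | _split_section_ranges
-- ===== SOURCE A (Python) =====
-- MARKDOWN_HEADING_PREFIXES = ("#", "##", "###", "####", "#####", "######")
--
-- def _is_heading_line(line: str) -> bool:
--     stripped = line.strip()
--     return any(
--         stripped.startswith(f"{prefix} ") for prefix in MARKDOWN_HEADING_PREFIXES
--     )
--
-- def _heading_title(line: str) -> str:
--     return line.strip().lstrip("#").strip()
--
-- def _heading_level(line: str) -> int:
--     stripped = line.strip()
--     return len(stripped) - len(stripped.lstrip("#"))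
--
-- def _split_section_ranges(text: str) -> list[tuple[int, int, str, int]]:
--     """按 Markdown 标题拆 section；没有标题时退化为整篇文档。
--
--     工业 RAG 里 chunk 最怕把标题和正文关系切散。这里先做轻量 section 感知：
--     看到 Markdown 标题就开启新 section，后续 chunk 会尽量在 section 内打包。
--     """
--
--     lines = text.splitlines(keepends=True)
--     sections: list[tuple[int, int, str, int]] = []
--     section_start = 0
--     section_title = ""
--     section_level = 0
--     offset = 0
--
--     for line in lines:
--         if _is_heading_line(line):
--             if offset > section_start:
--                 sections.append((section_start, offset, section_title, section_level))
--             section_start = offset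
--             section_title = _heading_title(line)
--             section_level = _heading_level(line)
--         offset += len(line)
--
--     if text:
--         sections.append((section_start, len(text), section_title, section_level))
--     return sections or [(0, len(text), "", 0)]
-- ===== SOURCE B (Python) =====
-- MARKDOWN_HEADING_PREFIXES = ("#", "##", "###", "####", "#####", "######")
--
-- def _is_heading_line(line: str) -> bool:
--     stripped = line.strip()
--     return any(
--         stripped.startswith(f"{prefix} ") for prefix in MARKDOWN_HEADING_PREFIXES
--     )
--
-- def _heading_title(line: str) -> str:
--     return line.strip().lstrip("#").strip()
--
-- def _heading_level(line: str) -> int: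
--     stripped = line.strip()
--     return len(stripped) - len(stripped.lstrip("#"))
--
-- def _split_section_ranges(text: str) -> list[tuple[int, int, str, int]]:
--     """Backward scan: walk the lines in reverse keeping only the end of the
--     current section; each heading closes the section that starts at it, so
--     sections are emitted back-to-front and reversed at the end."""
--     n = len(text)
--     if not text:
--         return [(0, n, "", 0)]
--     sections = []
--     end = n
--     pos = n
--     for line in reversed(text.splitlines(keepends=True)):
--         pos -= len(line)
--         if _is_heading_line(line):
--             sections.append((pos, end, _heading_title(line), _heading_level(line)))
--             end = pos
--     if end > 0:
--         sections.append((0, end, "", 0))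
--     sections.reverse()
--     return sections
-- ===== Notes on version B (the rewrite author's own statement) =====
-- stated objective: alternative
-- what changed: B scans the lines in reverse order, tracking only the end offset of the current section and emitting sections back-to-front (reversed at the end), instead of A's forward scan that carries the pending section's start/title/level and emits on the next heading.
import Mathlib
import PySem

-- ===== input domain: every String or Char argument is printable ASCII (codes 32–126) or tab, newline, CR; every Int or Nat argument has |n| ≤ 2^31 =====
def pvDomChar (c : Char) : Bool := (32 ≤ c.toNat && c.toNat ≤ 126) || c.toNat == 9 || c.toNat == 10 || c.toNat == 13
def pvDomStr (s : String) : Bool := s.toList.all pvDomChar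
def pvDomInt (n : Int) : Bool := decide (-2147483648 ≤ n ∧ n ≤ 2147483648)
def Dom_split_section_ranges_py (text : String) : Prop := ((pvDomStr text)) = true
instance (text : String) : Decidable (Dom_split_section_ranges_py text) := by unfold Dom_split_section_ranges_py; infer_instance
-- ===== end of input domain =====

-- B scans the lines in REVERSE, tracking only the end of the current section and emitting
-- sections back-to-front; same return value as A's forward emit-while-scanning, no speed claim.

-- shared helpers: exact ports of the module helpers both Pythons call
-- text.splitlines(keepends=True): exact on the Dom alphabet, whose only line breaks are '\n', '\r', '\r\n'
def splitKeep : List Char → List (List Char)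
  | [] => []
  | '\r' :: '\n' :: rest => ['\r', '\n'] :: splitKeep rest
  | '\n' :: rest => ['\n'] :: splitKeep rest
  | '\r' :: rest => ['\r'] :: splitKeep rest
  | c :: rest =>
    match splitKeep rest with
    | [] => [[c]]
    | l :: ls => (c :: l) :: ls

-- _is_heading_line
def isHeadingLine (line : List Char) : Bool :=
  let stripped := PySem.Chars.strip line
  (["#", "##", "###", "####", "#####", "######"].map String.toList).any
    (fun p => PySem.Chars.startswith stripped (p ++ [' ']))

-- _heading_title ; line.strip().lstrip("#") is dropWhile (· == '#') of the stripped line (exact)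
def headingTitle (line : List Char) : List Char :=
  PySem.Chars.strip (List.dropWhile (· == '#') (PySem.Chars.strip line))

-- _heading_level
def headingLevel (line : List Char) : Int :=
  let stripped := PySem.Chars.strip line
  (stripped.length : Int) - ((List.dropWhile (· == '#') stripped).length : Int)

-- ===== PORT A =====
-- loop body of A: state = (sections, section_start, section_title, section_level, offset)
def stepA (s : List (Int × Int × String × Int) × Int × String × Int × Int) (line : List Char) :
    List (Int × Int × String × Int) × Int × String × Int × Int :=
  match s with
  | (sections, secStart, secTitle, secLevel, offset) =>
    if isHeadingLine line then
      ((if offset > secStart then sections ++ [(secStart, offset, secTitle, secLevel)] else sections),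
       offset, String.ofList (headingTitle line), headingLevel line, offset + (line.length : Int))
    else
      (sections, secStart, secTitle, secLevel, offset + (line.length : Int))

def split_section_ranges_py (text : String) : List (Int × Int × String × Int) :=
  let n : Int := (text.toList.length : Int)
  let st := (splitKeep text.toList).foldl stepA ([], 0, "", 0, 0)
  let sections := if text.toList.isEmpty then st.1 else st.1 ++ [(st.2.1, n, st.2.2.1, st.2.2.2.1)]
  if sections.isEmpty then [(0, n, "", 0)] else sections

-- ===== PORT B =====
-- loop body of B: state = (sections emitted so far back-to-front, end of current section, pos)
def stepB (s : List (Int × Int × String × Int) × Int × Int) (line : List Char) :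
    List (Int × Int × String × Int) × Int × Int :=
  match s with
  | (sections, e, pos) =>
    let p := pos - (line.length : Int)
    if isHeadingLine line then
      (sections ++ [(p, e, String.ofList (headingTitle line), headingLevel line)], p, p)
    else
      (sections, e, p)

def split_section_ranges_py_alt (text : String) : List (Int × Int × String × Int) :=
  let n : Int := (text.toList.length : Int)
  if text.toList.isEmpty then [(0, n, "", 0)]
  else
    let st := ((splitKeep text.toList).reverse).foldl stepB ([], n, n)
    let sections := st.1 ++ (if st.2.1 > 0 then [(0, st.2.1, "", 0)] else [])
    sections.reverse

-- ===== PRECONDITION & SPEC =====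
def Spec_split_section_ranges_py (text : String) (out : List (Int × Int × String × Int)) : Prop := out = split_section_ranges_py_alt text
instance (text : String) (out : List (Int × Int × String × Int)) : Decidable (Spec_split_section_ranges_py text out) := by unfold Spec_split_section_ranges_py; infer_instance

-- ===== CLAIM (what is proved, stated in full; the proofs are below) =====
def Claim_equal_split_section_ranges_py : Prop := ∀ (text : String), Dom_split_section_ranges_py text → Spec_split_section_ranges_py text (split_section_ranges_py text)

-- ===== LEMMAS AND PROOFS =====

-- closed recursive form of A's result on nonempty text (fold + trailing section)
def Afull : List (List Char) → Int → String → Int → Int → Int → List (Int × Int × String × Int)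
  | [], ss, st, sl, _, n => [(ss, n, st, sl)]
  | l :: ls, ss, st, sl, off, n =>
    if isHeadingLine l then
      (if off > ss then [(ss, off, st, sl)] else []) ++
        Afull ls off (String.ofList (headingTitle l)) (headingLevel l) (off + (l.length : Int)) n
    else Afull ls ss st sl (off + (l.length : Int)) n

def sumlen : List (List Char) → Int
  | [] => 0
  | l :: ls => (l.length : Int) + sumlen ls

lemma sumlen_nonneg (ls : List (List Char)) : 0 ≤ sumlen ls := by
  induction ls with
  | nil => simp [sumlen]
  | cons l ls ih => simp only [sumlen]; have := Int.natCast_nonneg l.length; omega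

lemma heading_ne_nil {l : List Char} (h : isHeadingLine l = true) : l ≠ [] := by
  rintro rfl; exact absurd h (by decide)

lemma heading_len_pos {l : List Char} (h : isHeadingLine l = true) : 1 ≤ (l.length : Int) := by
  cases l with
  | nil => exact absurd rfl (heading_ne_nil h)
  | cons c cs => simp only [List.length_cons]; have := Int.natCast_nonneg cs.length; push_cast; omega

-- A's fold followed by the trailing append equals secs ++ Afull
lemma afold (n : Int) (lines : List (List Char)) :
    ∀ secs ss st sl off,
      (let f := lines.foldl stepA (secs, ss, st, sl, off);
        f.1 ++ [(f.2.1, n, f.2.2.1, f.2.2.2.1)]) = secs ++ Afull lines ss st sl off n := by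
  induction lines with
  | nil => intro secs ss st sl off; simp [Afull]
  | cons l ls ih =>
    intro secs ss st sl off
    by_cases hh : isHeadingLine l = true
    · by_cases hgt : off > ss
      · simpa [List.foldl, stepA, hh, hgt, Afull] using
          ih (secs ++ [(ss, off, st, sl)]) off (String.ofList (headingTitle l)) (headingLevel l)
            (off + (l.length : Int))
      · simpa [List.foldl, stepA, hh, hgt, Afull] using
          ih secs off (String.ofList (headingTitle l)) (headingLevel l) (off + (l.length : Int))
    · simpa [List.foldl, stepA, hh, Afull] using
        ih secs ss st sl (off + (l.length : Int))

-- B's fold (as a foldr on the original line order) characterised against Afull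
lemma bfold (n : Int) (lines : List (List Char)) :
    (let r := lines.foldr (fun x y => stepB y x) ([], n, n);
      r.2.2 = n - sumlen lines ∧ r.2.2 ≤ r.2.1 ∧
        ∀ ss st sl, ss < n →
          Afull lines ss st sl (n - sumlen lines) n
            = (if r.2.1 > ss then [(ss, r.2.1, st, sl)] else []) ++ r.1.reverse) := by
  induction lines with
  | nil =>
    refine ⟨by simp [sumlen], le_refl _, ?_⟩
    intro ss st sl hss
    simp [Afull, show n > ss from hss]
  | cons l ls ih =>
    simp only [List.foldr_cons] at *
    generalize hr : (List.foldr (fun x y => stepB y x) ([], n, n) ls) = r at ih ⊢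
    obtain ⟨S, e, p⟩ := r
    obtain ⟨hp, hpe, hA⟩ := ih
    simp only at hp hpe
    have hl0 := Int.natCast_nonneg l.length
    by_cases hh : isHeadingLine l = true
    · have hlen := heading_len_pos hh
      refine ⟨?_, ?_, ?_⟩
      · simp only [stepB, hh, if_true, sumlen]; omega
      · simp only [stepB, hh, if_true]; omega
      · intro ss st sl hss
        have hoff : n - sumlen (l :: ls) = p - (l.length : Int) := by
          simp only [sumlen]; omega
        have hofflt : p - (l.length : Int) < n := by
          have := sumlen_nonneg ls; omega
        have h2 : p - (l.length : Int) + (l.length : Int) = n - sumlen ls := by omega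
        have hegt : e > p - (l.length : Int) := by omega
        have hrec := hA (p - (l.length : Int)) (String.ofList (headingTitle l)) (headingLevel l) hofflt
        rw [hoff]
        simp only [Afull, hh, if_true, h2, hrec, if_pos hegt, stepB]
        simp
    · refine ⟨?_, ?_, ?_⟩
      · simp only [stepB, hh, Bool.false_eq_true, if_false, sumlen]; omega
      · simp only [stepB, hh, Bool.false_eq_true, if_false]; omega
      · intro ss st sl hss
        have hoff : n - sumlen (l :: ls) = p - (l.length : Int) := by
          simp only [sumlen]; omega
        have h2 : p - (l.length : Int) + (l.length : Int) = n - sumlen ls := by omega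
        rw [hoff]
        simp only [Afull, hh, Bool.false_eq_true, if_false, h2, hA ss st sl hss, stepB]

lemma sumlen_splitKeep (cs : List Char) : sumlen (splitKeep cs) = (cs.length : Int) := by
  fun_induction splitKeep cs <;> simp_all [sumlen] <;> omega

-- ===== VERDICT (by name: the statement is the Claim_ definition above) =====
theorem split_section_ranges_py_spec : Claim_equal_split_section_ranges_py := by
  intro text _
  unfold Spec_split_section_ranges_py
  by_cases he : text.toList.isEmpty = true
  · have h0 : text.toList = [] := by simpa [List.isEmpty_iff] using he
    simp [split_section_ranges_py, split_section_ranges_py_alt, h0, splitKeep]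
  · have hnil : text.toList ≠ [] := by simpa [List.isEmpty_iff] using he
    have hn : 0 < (text.toList.length : Int) := by
      exact_mod_cast List.length_pos_iff.mpr hnil
    obtain ⟨hp, hpe, hA⟩ := bfold (text.toList.length : Int) (splitKeep text.toList)
    have hA0 := hA 0 "" 0 hn
    rw [sumlen_splitKeep, sub_self] at hA0
    have hAchar := afold (text.toList.length : Int) (splitKeep text.toList) [] 0 "" 0 0
    simp only [List.nil_append] at hAchar
    simp only [split_section_ranges_py, split_section_ranges_py_alt, he, Bool.false_eq_true,
      if_false, List.foldl_reverse]
    rw [if_neg (by simp)]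
    rw [hAchar, hA0, List.reverse_append]
    congr 1
    split <;> simp
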